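-- pv_equiv track=rewrite | github.com/k-walter/Codes | AOC/2020/11.py | iterDiagRight
-- ===== SOURCE A (Python) =====
-- from typing import List, Tuple, TypeVar, Generator
--
-- def iterDiagRight(grid: List[List[int]]) -> Generator[List[Tuple[int, int]], None, None]:
--     n: int = len(grid)
--     m: int = len(grid[0])
--
--     def iterDiag(i: int):
--         y: int = max(0, i)
--         x: int = max(0, -i)
--         while x < m and y < n:
--             yield (y, x)
--             y += 1
--             x += 1
--     for i in range(1 - m, n):
--         yield list(iterDiag(i))
-- ===== SOURCE B (Python) =====
-- from typing import List, Tuple, Generator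
--
-- def iterDiagRight(grid: List[List[int]]) -> Generator[List[Tuple[int, int]], None, None]:
--     n: int = len(grid)
--     m: int = len(grid[0])
--     buckets = {}
--     for y in range(n):
--         for x in range(m):
--             buckets.setdefault(y - x, []).append((y, x))
--     for i in range(1 - m, n):
--         yield buckets.get(i, [])
-- ===== Notes on version B (the rewrite author's own statement) =====
-- stated objective: alternative
-- what changed: A walks each diagonal with a directed (y+1,x+1) while-loop per diagonal index; B makes one grouping pass over all grid coordinates into a dict of buckets keyed by y-x and then reads the buckets off in diagonal order.
import Mathlib
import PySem

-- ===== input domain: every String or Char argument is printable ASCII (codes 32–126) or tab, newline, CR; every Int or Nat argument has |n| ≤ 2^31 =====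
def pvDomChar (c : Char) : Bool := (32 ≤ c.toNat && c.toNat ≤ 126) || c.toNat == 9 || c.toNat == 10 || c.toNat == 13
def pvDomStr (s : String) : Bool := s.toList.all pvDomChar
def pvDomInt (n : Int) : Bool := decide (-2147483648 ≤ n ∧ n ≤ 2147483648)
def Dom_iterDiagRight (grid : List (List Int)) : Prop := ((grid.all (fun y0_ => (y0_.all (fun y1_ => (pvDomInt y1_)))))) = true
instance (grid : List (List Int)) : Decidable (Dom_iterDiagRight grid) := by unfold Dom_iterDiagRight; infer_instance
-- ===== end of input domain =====

-- B replaces A's per-diagonal directed walks by one grouping pass into a dict of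
-- buckets keyed by the diagonal index y - x (objective: alternative). Both Pythons
-- are generators; the equivalence is about the list of yielded values, and both
-- raise IndexError (grid[0]) on the empty grid, which Pre_ excludes.

-- ===== PORT A =====
-- inner generator: while x < m and y < n: yield (y, x); y += 1; x += 1
def diagWalk (n m y x : Int) : List (Int × Int) :=
  if _h : x < m ∧ y < n then (y, x) :: diagWalk n m (y + 1) (x + 1) else []
termination_by (n - y).toNat
decreasing_by omega

def iterDiagRight (grid : List (List Int)) : List (List (Int × Int)) :=
  let n : Int := grid.length
  let m : Int := (PySem.List.pyGetD grid 0 []).length   -- grid[0]; Pre_ rules out the IndexError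
  (PySem.List.pyRange (1 - m) n 1).map (fun i => diagWalk n m (max 0 i) (max 0 (-i)))

-- ===== PORT B =====
def iterDiagRight_alt (grid : List (List Int)) : List (List (Int × Int)) :=
  let n : Int := grid.length
  let m : Int := (PySem.List.pyGetD grid 0 []).length   -- grid[0]; Pre_ rules out the IndexError
  let buckets : PySem.Dict Int (List (Int × Int)) :=
    (PySem.List.pyRange 0 n 1).foldl (fun d y =>
      (PySem.List.pyRange 0 m 1).foldl (fun d x =>
        d.modify (y - x) [] (· ++ [(y, x)])) d)   -- buckets.setdefault(y-x, []).append((y, x))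
      PySem.Dict.empty
  (PySem.List.pyRange (1 - m) n 1).map (fun i => buckets.getD i [])

-- ===== PRECONDITION & SPEC =====
-- Pre_ excludes only the empty grid, on which both Pythons raise IndexError at grid[0].
def Pre_iterDiagRight (grid : List (List Int)) : Prop := grid ≠ []
instance (grid : List (List Int)) : Decidable (Pre_iterDiagRight grid) := by unfold Pre_iterDiagRight; infer_instance
def pvWitness_iterDiagRight : List (List Int) := [[1, 2], [3, 4], [5, 6]]

def Spec_iterDiagRight (grid : List (List Int)) (out : List (List (Int × Int))) : Prop := out = iterDiagRight_alt grid
instance (grid : List (List Int)) (out : List (List (Int × Int))) : Decidable (Spec_iterDiagRight grid out) := by unfold Spec_iterDiagRight; infer_instance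

-- ===== CLAIM (what is proved, stated in full; the proofs are below) =====
def Claim_equal_iterDiagRight : Prop := ∀ (grid : List (List Int)), Dom_iterDiagRight grid → Pre_iterDiagRight grid → Spec_iterDiagRight grid (iterDiagRight grid)

-- ===== LEMMAS AND PROOFS =====

-- all (y, x) cell coordinates of the n × m grid, row by row
def allPairs (n m : Int) : List (Int × Int) :=
  (PySem.List.pyRange 0 n 1).flatMap (fun y => (PySem.List.pyRange 0 m 1).map (fun x => (y, x)))

-- B's nested grouping loop, read off one bucket
lemma buckets_getD (n m i : Int) :
    ((PySem.List.pyRange 0 n 1).foldl (fun d y =>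
        (PySem.List.pyRange 0 m 1).foldl (fun d x =>
          d.modify (y - x) [] (· ++ [(y, x)])) d)
      (PySem.Dict.empty : PySem.Dict Int (List (Int × Int)))).getD i []
    = (allPairs n m).filter (fun p => p.1 - p.2 == i) := by
  have step1 : (PySem.List.pyRange 0 n 1).foldl (fun d y =>
        (PySem.List.pyRange 0 m 1).foldl (fun d x =>
          d.modify (y - x) [] (· ++ [(y, x)])) d)
      (PySem.Dict.empty : PySem.Dict Int (List (Int × Int)))
      = ((allPairs n m).map (fun p => (p.1 - p.2, p))).foldl
          (fun d q => d.modify q.1 [] (· ++ [q.2])) PySem.Dict.empty := by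
    unfold allPairs
    simp [List.foldl_flatMap, List.foldl_map]
  rw [step1, PySem.Dict.getD_foldl_modify_append, PySem.Dict.getD_empty]
  rw [List.filter_map]
  simp only [Function.comp_def]
  simp [List.map_map, Function.comp_def]

-- a range filtered for one value
lemma filter_pyRange_eq (a b c : Int) :
    (PySem.List.pyRange a b 1).filter (fun x => x == c)
    = if a ≤ c ∧ c < b then [c] else [] := by
  have H : ∀ (k : Nat) (a : Int), (b - a).toNat = k →
      (PySem.List.pyRange a b 1).filter (fun x => x == c)
      = if a ≤ c ∧ c < b then [c] else [] := by
    intro k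
    induction k with
    | zero =>
      intro a hk
      rw [PySem.List.pyRange_one_eq_nil (by omega), if_neg (by omega)]
      rfl
    | succ k ih =>
      intro a hk
      rw [PySem.List.pyRange_one_cons (by omega), List.filter_cons]
      by_cases hc : a = c
      · subst hc
        rw [ih (a + 1) (by omega)]
        rw [if_neg (show ¬(a + 1 ≤ a ∧ a < b) by omega)]
        rw [if_pos (show a ≤ a ∧ a < b by omega)]
        simp
      · have hd : ((a == c) = false) := by simpa using hc
        rw [hd, ih (a + 1) (by omega), if_neg (by simp)]
        by_cases h2 : a + 1 ≤ c ∧ c < b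
        · rw [if_pos h2, if_pos (by omega)]
        · rw [if_neg h2, if_neg (by omega)]
  exact H (b - a).toNat a rfl

-- grouping step: restricting the row range to the rows the diagonal i meets
lemma flatMap_ite_eq_range (m i : Int) : ∀ (N : Nat),
    (PySem.List.pyRange 0 (N : Int) 1).flatMap
      (fun y => if 0 ≤ y - i ∧ y - i < m then [(y, y - i)] else [])
    = (PySem.List.pyRange (max 0 i) (min (N : Int) (m + i)) 1).map (fun z => (z, z - i)) := by
  intro N
  induction N with
  | zero =>
    rw [PySem.List.pyRange_one_eq_nil (by omega), PySem.List.pyRange_one_eq_nil (by omega)]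
    rfl
  | succ N ih =>
    have hc : ((N + 1 : Nat) : Int) = (N : Int) + 1 := by push_cast; ring
    rw [hc, PySem.List.pyRange_one_succ_right (by omega), List.flatMap_append, ih]
    simp only [List.flatMap_cons, List.flatMap_nil, List.append_nil]
    by_cases h : 0 ≤ (N : Int) - i ∧ (N : Int) - i < m
    · rw [if_pos h]
      have e1 : min ((N : Int) + 1) (m + i) = (N : Int) + 1 := by omega
      have e2 : min ((N : Int)) (m + i) = (N : Int) := by omega
      rw [e1, e2, PySem.List.pyRange_one_succ_right (by omega), List.map_append]
      rfl
    · rw [if_neg h, List.append_nil]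
      by_cases hN : (N : Int) < i
      · rw [PySem.List.pyRange_one_eq_nil (by omega), PySem.List.pyRange_one_eq_nil (by omega)]
      · have e : min ((N : Int) + 1) (m + i) = min ((N : Int)) (m + i) := by omega
        rw [e]

-- the bucket of diagonal i, in closed form
lemma filter_allPairs (n m i : Int) :
    (allPairs n m).filter (fun p => p.1 - p.2 == i)
    = (PySem.List.pyRange (max 0 i) (min n (m + i)) 1).map (fun z => (z, z - i)) := by
  unfold allPairs
  rw [List.filter_flatMap]
  have inner : ∀ y : Int,
      (((PySem.List.pyRange 0 m 1).map (fun x => (y, x))).filter (fun p => p.1 - p.2 == i))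
      = if 0 ≤ y - i ∧ y - i < m then [(y, y - i)] else [] := by
    intro y
    rw [List.filter_map]
    have hp : ((fun (p : Int × Int) => p.1 - p.2 == i) ∘ (fun x => (y, x))) = (fun x => x == y - i) := by
      funext x
      simp only [Function.comp]
      by_cases h : x = y - i
      · subst h; simp
      · have h1 : (y - x == i) = false := by simpa using (by omega : ¬ y - x = i)
        have h2 : (x == y - i) = false := by simpa using h
        rw [h1, h2]
    rw [hp, filter_pyRange_eq 0 m (y - i)]
    by_cases h : 0 ≤ y - i ∧ y - i < m
    · rw [if_pos h, if_pos h]; rfl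
    · rw [if_neg h, if_neg h]; rfl
  simp only [inner]
  by_cases hn : 0 < n
  · have hN : n = ((n.toNat : Nat) : Int) := by omega
    rw [hN]
    exact flatMap_ite_eq_range m i n.toNat
  · rw [PySem.List.pyRange_one_eq_nil (by omega), PySem.List.pyRange_one_eq_nil (by omega)]
    rfl

-- A's directed walk, in the same closed form
lemma diagWalk_eq (n m : Int) : ∀ (y x : Int),
    diagWalk n m y x
    = (PySem.List.pyRange y (min n (m + (y - x))) 1).map (fun z => (z, z - (y - x))) := by
  intro y x
  fun_induction diagWalk n m y x with
  | case1 y x h ih =>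
    rw [PySem.List.pyRange_one_cons (by omega), ih]
    have h2 : y + 1 - (x + 1) = y - x := by omega
    have h3 : y - (y - x) = x := by omega
    rw [h2]
    simp only [List.map_cons, h3]
  | case2 y x h =>
    rw [PySem.List.pyRange_one_eq_nil (by omega)]
    rfl

-- ===== VERDICT (by name: the statement is the Claim_ definition above) =====
theorem iterDiagRight_spec : Claim_equal_iterDiagRight := by
  intro grid _ _
  unfold Spec_iterDiagRight iterDiagRight iterDiagRight_alt
  simp only []
  apply List.map_congr_left
  intro i _
  rw [buckets_getD, filter_allPairs, diagWalk_eq]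
  have h1 : max 0 i - max 0 (-i) = i := by omega
  rw [h1]
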